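-- pv_equiv track=rewrite | github.com/GruPy-RN/coding-dojo | #01 01-12-2018/first_steps/problem_2/previous_solution.py | largest_sequence
-- ===== SOURCE A (Python) =====
-- def collatz(n):
--     seq = 1
--     while n != 1:
--         if n % 2 == 0:
--             n //= 2
--         else:
--             n = 3*n + 1
--         seq += 1
--     return seq
--
-- def largest_sequence(k):
--     maior = 0
--     ans = (0, 0)
--     for i in range(1, k+1):
--         t = collatz(i)
--         if t > ans[1]:
--             ans = (i, t)
--     return ans
-- ===== SOURCE B (Python) =====
-- def collatz(n):
--     # same chain-length function, written as structural recursion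
--     return 1 if n == 1 else 1 + collatz(n // 2 if n % 2 == 0 else 3 * n + 1)
--
-- def largest_sequence(k):
--     lengths = [collatz(i) for i in range(1, k + 1)]
--     if not lengths:
--         return (0, 0)
--     t = max(lengths)
--     return (lengths.index(t) + 1, t)
-- ===== Notes on version B (the rewrite author's own statement) =====
-- stated objective: idiomatic
-- what changed: B replaces A's imperative running-argmax accumulator loop (with an iterative counter collatz) by staged passes: a recursive collatz, a comprehension materialising all chain lengths, then the builtins max and list.index to pick the first maximum.
import Mathlib
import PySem

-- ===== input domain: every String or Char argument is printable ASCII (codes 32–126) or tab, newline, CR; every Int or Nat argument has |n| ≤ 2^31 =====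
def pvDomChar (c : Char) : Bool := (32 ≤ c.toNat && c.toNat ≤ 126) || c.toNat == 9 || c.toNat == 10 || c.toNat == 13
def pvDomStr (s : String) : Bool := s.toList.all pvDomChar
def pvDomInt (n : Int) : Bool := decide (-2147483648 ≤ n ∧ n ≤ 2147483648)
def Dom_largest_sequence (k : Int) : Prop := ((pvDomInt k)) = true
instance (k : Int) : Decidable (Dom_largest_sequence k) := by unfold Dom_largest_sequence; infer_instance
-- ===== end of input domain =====

-- B restates A with staged passes — a recursive collatz, a list of all chain lengths, then
-- builtin first-max and first-index — instead of A's manual running-argmax loop (objective: idiomatic).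

-- ===== PORT A =====
-- Python's `while n != 1` loop, made total with fuel; the fuel guard only totalizes the
-- same computation (it never fires on the tested inputs).
def collatzGo : Nat → Int → Int → Int
  | 0, _, seq => seq
  | fuel+1, n, seq =>
    if n ≠ 1 then
      (if PySem.Int.mod n 2 = 0 then collatzGo fuel (PySem.Int.floordiv n 2) (seq + 1)
       else collatzGo fuel (3 * n + 1) (seq + 1))
    else seq

def collatz (n : Int) : Int := collatzGo 100000 n 1

-- body of A's `for` loop (strict `>` update; first maximum wins)
def upStep (ans : Int × Int) (i : Int) : Int × Int :=
  let t := collatz i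
  if t > ans.2 then (i, t) else ans

def largest_sequence (k : Int) : List Int :=
  let ans := (PySem.List.pyRange 1 (k + 1) 1).foldl upStep ((0 : Int), (0 : Int))
  [ans.1, ans.2]

-- ===== PORT B =====
-- B's recursive collatz, made total with the same fuel (base value 1 is only the fuel guard)
def collatzRec : Nat → Int → Int
  | 0, _ => 1
  | fuel+1, n =>
    if n = 1 then 1
    else 1 + collatzRec fuel (if PySem.Int.mod n 2 = 0 then PySem.Int.floordiv n 2 else 3 * n + 1)

def largest_sequence_alt (k : Int) : List Int :=
  let lengths := (PySem.List.pyRange 1 (k + 1) 1).map (collatzRec 100000)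
  if lengths = [] then [0, 0]
  else
    match PySem.List.max? lengths (fun x => x) with
    | none => [0, 0]          -- unreachable: lengths ≠ []
    | some t =>
      match PySem.List.index? lengths t with
      | none => [0, 0]        -- unreachable: t ∈ lengths
      | some idx => [(idx : Int) + 1, t]

-- ===== PRECONDITION & SPEC =====
def Spec_largest_sequence (k : Int) (out : List Int) : Prop := out = largest_sequence_alt k
instance (k : Int) (out : List Int) : Decidable (Spec_largest_sequence k out) := by unfold Spec_largest_sequence; infer_instance

-- ===== CLAIM (what is proved, stated in full; the proofs are below) =====
def Claim_equal_largest_sequence : Prop := ∀ (k : Int), Dom_largest_sequence k → Spec_largest_sequence k (largest_sequence k)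

-- ===== LEMMAS AND PROOFS =====

theorem collatzGo_shift (f : Nat) (n s : Int) : collatzGo f n s = s - 1 + collatzGo f n 1 := by
  induction f generalizing n s with
  | zero => simp [collatzGo]
  | succ f ih =>
    simp only [collatzGo]
    split
    · split
      · rw [ih _ (s + 1), ih _ (1 + 1)]; ring
      · rw [ih _ (s + 1), ih _ (1 + 1)]; ring
    · omega

theorem collatzRec_eq (f : Nat) (n : Int) : collatzRec f n = collatzGo f n 1 := by
  induction f generalizing n with
  | zero => simp [collatzRec, collatzGo]
  | succ f ih =>
    by_cases h : n = 1
    · simp [collatzRec, collatzGo, h]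
    · simp only [collatzRec, collatzGo, if_neg h, if_pos (show n ≠ 1 from h)]
      by_cases h2 : PySem.Int.mod n 2 = 0
      · rw [if_pos h2, if_pos h2, ih, collatzGo_shift f _ (1 + 1)]; ring
      · rw [if_neg h2, if_neg h2, ih, collatzGo_shift f _ (1 + 1)]; ring

-- A's fold over [1..n] returns (first index attaining the max chain length, that max)
theorem fold_argmax (n : Nat) (h : 1 ≤ n) :
    ∃ t idx,
      PySem.List.max? ((PySem.List.pyRange 1 ((n : Int) + 1) 1).map collatz) (fun x => x) = some t ∧
      PySem.List.index? ((PySem.List.pyRange 1 ((n : Int) + 1) 1).map collatz) t = some idx ∧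
      (PySem.List.pyRange 1 ((n : Int) + 1) 1).foldl upStep ((0 : Int), (0 : Int)) = ((idx : Int) + 1, t) := by
  induction n with
  | zero => omega
  | succ m ih =>
    by_cases hm : 1 ≤ m
    · obtain ⟨t0, idx0, hmax, hidx, hfold⟩ := ih hm
      have hb : ((m + 1 : Nat) : Int) + 1 = ((m : Int) + 1) + 1 := by push_cast; ring
      rw [hb, PySem.List.pyRange_one_succ_right (by omega : (1 : Int) ≤ (m : Int) + 1)]
      rw [List.map_append, List.foldl_append]
      simp only [List.map_cons, List.map_nil]
      set l := PySem.List.pyRange 1 ((m : Int) + 1) 1 with hl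
      set c := collatz ((m : Int) + 1) with hc
      have hLne : l.map collatz ≠ [] := by
        intro hnil
        rw [hnil] at hmax
        simp [PySem.List.max?] at hmax
      obtain ⟨x, tl, hxt⟩ := List.exists_cons_of_ne_nil hLne
      have hmax' : PySem.List.max? (l.map collatz ++ [c]) (fun x => x) = some (max t0 c) := by
        rw [hxt] at hmax ⊢
        rw [PySem.List.max?_id_cons] at hmax
        rw [List.cons_append, PySem.List.max?_id_cons, List.foldl_append]
        simp only [List.foldl_cons, List.foldl_nil]
        rw [Option.some_inj] at hmax
        rw [hmax]
      have hlen : (l.map collatz).length = m := by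
        rw [List.length_map, hl, PySem.List.length_pyRange_one]
        omega
      by_cases hcase : t0 < c
      · -- new maximum at position m (value m+1)
        refine ⟨c, m, ?_, ?_, ?_⟩
        · rw [hmax', max_eq_right (le_of_lt hcase)]
        · have hnot : c ∉ l.map collatz := by
            intro hmem
            have := PySem.List.max?_isMax hmax c hmem
            simp only at this
            omega
          rw [PySem.List.index?_append_singleton_self _ _ hnot, hlen]
        · rw [hfold]
          simp only [List.foldl_cons, List.foldl_nil, upStep]
          rw [← hc, if_pos (by omega : c > ((idx0 : Int) + 1, t0).2)]
      · -- maximum unchanged; first index unchanged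
        refine ⟨t0, idx0, ?_, ?_, ?_⟩
        · rw [hmax', max_eq_left (not_lt.mp hcase)]
        · have hmem : t0 ∈ l.map collatz := PySem.List.max?_mem hmax
          rw [PySem.List.index?_append_of_mem [c] hmem, hidx]
        · rw [hfold]
          simp only [List.foldl_cons, List.foldl_nil, upStep]
          rw [← hc, if_neg (by omega : ¬ c > ((idx0 : Int) + 1, t0).2)]
    · have : m = 0 := by omega
      subst this
      refine ⟨1, 0, ?_, ?_, ?_⟩ <;> decide

-- ===== VERDICT (by name: the statement is the Claim_ definition above) =====
theorem largest_sequence_spec : Claim_equal_largest_sequence := by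
  intro k _
  unfold Spec_largest_sequence
  simp only [largest_sequence, largest_sequence_alt]
  by_cases hk : k ≤ 0
  · rw [PySem.List.pyRange_one_eq_nil (by omega : k + 1 ≤ 1)]
    simp
  · have hn : ((k.toNat : Int)) = k := Int.toNat_of_nonneg (by omega)
    obtain ⟨t, idx, hmax, hidx, hfold⟩ := fold_argmax k.toNat (by omega)
    rw [hn] at hmax hidx hfold
    have hmapeq : (PySem.List.pyRange 1 (k + 1) 1).map (collatzRec 100000)
        = (PySem.List.pyRange 1 (k + 1) 1).map collatz := by
      simp [collatzRec_eq, collatz]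
    have hcons := PySem.List.pyRange_one_cons (show (1 : Int) < k + 1 by omega)
    rw [hmapeq, hfold,
        if_neg (show (PySem.List.pyRange 1 (k + 1) 1).map collatz ≠ [] from by rw [hcons]; simp),
        hmax]
    simp only [PySem.List.index?_eq_idxOf?] at hidx
    simp [hidx]
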